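-- pv_equiv track=rewrite | github.com/Ferdinand1201/dental-caries-detection-yolo-cnn | object_detector.py | sort_detections_by_grid
-- ===== SOURCE A (Python) =====
-- def sort_detections_by_grid(detections, row_threshold=50):
--     """
--     Sortează regiunile detectate în funcție de poziția lor verticală și orizontală în imagine.
--     """
--     if not detections:
--         return []
--
--     detections = [list(det) for det in detections]
--     detections_with_center_y = [(det, (det[1] + det[3]) / 2) for det in detections]
--     detections_with_center_y.sort(key=lambda x: x[1])
--
--     sorted_groups = []
--     current_group = [detections_with_center_y[0][0]]
--     current_y = detections_with_center_y[0][1]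
--
--     for det, y_center in detections_with_center_y[1:]:
--         if abs(y_center - current_y) < row_threshold:
--             current_group.append(det)
--         else:
--             current_group.sort(key=lambda d: d[0])
--             sorted_groups.extend(current_group)
--             current_group = [det]
--             current_y = y_center
--
--     current_group.sort(key=lambda d: d[0])
--     sorted_groups.extend(current_group)
--
--     return sorted_groups
-- ===== SOURCE B (Python) =====
-- def sort_detections_by_grid(detections, row_threshold=50):
--     """Split-off-the-leading-row decomposition: after the y-sort, repeatedly scan
--     for the first detection out of threshold of the row's first element, emit
--     that row sorted by x, and continue on the remainder. Exact integer
--     arithmetic via doubled centers (d[1]+d[3]): |c-c0| >= 2*t <=> A's float test."""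
--     items = sorted([(list(d), d[1] + d[3]) for d in detections], key=lambda p: p[1])
--     out = []
--     while items:
--         d0, c0 = items[0]
--         rest = items[1:]
--         k = 0
--         while k < len(rest) and abs(rest[k][1] - c0) < 2 * row_threshold:
--             k += 1
--         row = sorted([d0] + [d for d, _ in rest[:k]], key=lambda d: d[0])
--         out.extend(row)
--         items = rest[k:]
--     return out
-- ===== Notes on version B (the rewrite author's own statement) =====
-- stated objective: alternative
-- what changed: B replaces A's single pass that grows a current-group accumulator and flushes it at each break with a split decomposition: it repeatedly scans the y-sorted remainder for the first out-of-threshold element, emits that leading row sorted by x, and continues on the suffix; it also uses exact doubled-center integer arithmetic instead of float half-centers.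
import Mathlib
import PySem

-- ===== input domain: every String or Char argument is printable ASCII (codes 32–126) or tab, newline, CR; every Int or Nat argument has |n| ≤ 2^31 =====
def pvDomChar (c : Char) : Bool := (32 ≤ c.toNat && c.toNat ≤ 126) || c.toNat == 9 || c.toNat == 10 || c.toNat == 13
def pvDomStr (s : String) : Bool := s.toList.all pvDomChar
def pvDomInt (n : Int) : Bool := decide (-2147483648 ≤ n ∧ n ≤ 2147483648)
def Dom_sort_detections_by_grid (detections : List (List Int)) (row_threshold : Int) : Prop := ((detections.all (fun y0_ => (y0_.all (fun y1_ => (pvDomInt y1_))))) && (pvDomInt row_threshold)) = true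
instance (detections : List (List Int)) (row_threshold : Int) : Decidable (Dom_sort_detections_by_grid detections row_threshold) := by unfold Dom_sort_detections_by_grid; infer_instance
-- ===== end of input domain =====

-- B replaces A's grow-and-flush group accumulator with a split decomposition (scan off the
-- leading row, x-sort it, recurse on the rest) in exact doubled-center integer arithmetic;
-- return-value equivalence only (A copies its input rows, invisible to the caller).


-- ===== PORT A =====
-- Python's center (det[1]+det[3])/2 is a float, but on Dom (|ints| ≤ 2^31) it is an exact
-- half-integer and all float comparisons A makes are exact; the port carries the DOUBLED
-- center det[1]+det[3] and tests |Δ| < 2*row_threshold, the same comparison.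
-- A's `list(det)` copies are identity on immutable Lean lists.
def sort_detections_by_grid (detections : List (List Int)) (row_threshold : Int) : List (List Int) :=
  if detections = [] then []
  else
    let dwc := detections.map (fun det => (det, PySem.List.pyGetD det 1 0 + PySem.List.pyGetD det 3 0))
    let dwc := PySem.List.sorted dwc (fun x => x.2) false
    match dwc with
    | [] => []  -- unreachable (detections ≠ []); totality guard for dwc[0]
    | (d0, y0) :: rest =>
      let st := rest.foldl
        (fun (st : List (List Int) × List (List Int) × Int) p =>
          if |p.2 - st.2.2| < 2 * row_threshold then
            (st.1, st.2.1 ++ [p.1], st.2.2)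
          else
            (st.1 ++ PySem.List.sorted st.2.1 (fun d => PySem.List.pyGetD d 0 0) false, [p.1], p.2))
        ([], [d0], y0)
      st.1 ++ PySem.List.sorted st.2.1 (fun d => PySem.List.pyGetD d 0 0) false

-- ===== PORT B =====
-- Source B's outer `while items:` loop ported as well-founded recursion; the inner index scan
-- `while k < len(rest) and abs(...) < 2*t` with the slices rest[:k] / rest[k:] is exactly
-- takeWhile / dropWhile of the same predicate on rest.
def pvArrange (T : Int) : List (List Int × Int) → List (List Int)
  | [] => []
  | (d0, c0) :: rest =>
    PySem.List.sorted (d0 :: (rest.takeWhile (fun p => decide (|p.2 - c0| < T))).map Prod.fst)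
        (fun d => PySem.List.pyGetD d 0 0) false
      ++ pvArrange T (rest.dropWhile (fun p => decide (|p.2 - c0| < T)))
termination_by l => l.length
decreasing_by
  have := List.length_dropWhile_le (fun p => decide (|p.2 - c0| < T)) rest
  simp; omega

def sort_detections_by_grid_alt (detections : List (List Int)) (row_threshold : Int) : List (List Int) :=
  pvArrange (2 * row_threshold)
    (PySem.List.sorted
      (detections.map (fun d => (d, PySem.List.pyGetD d 1 0 + PySem.List.pyGetD d 3 0)))
      (fun p => p.2) false)

-- ===== PRECONDITION & SPEC =====
-- Pre_ excludes exactly the inputs where the Python A raises IndexError: a detection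
-- shorter than 4 entries (A reads det[0], det[1], det[3]).
def Pre_sort_detections_by_grid (detections : List (List Int)) (row_threshold : Int) : Prop :=
  ∀ det ∈ detections, 4 ≤ det.length
instance (detections : List (List Int)) (row_threshold : Int) : Decidable (Pre_sort_detections_by_grid detections row_threshold) := by unfold Pre_sort_detections_by_grid; infer_instance
def pvWitness_sort_detections_by_grid : List (List Int) × Int := ([[10, 2, 30, 4], [0, 1, 2, 3]], 50)

def Spec_sort_detections_by_grid (detections : List (List Int)) (row_threshold : Int) (out : List (List Int)) : Prop := out = sort_detections_by_grid_alt detections row_threshold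
instance (detections : List (List Int)) (row_threshold : Int) (out : List (List Int)) : Decidable (Spec_sort_detections_by_grid detections row_threshold out) := by unfold Spec_sort_detections_by_grid; infer_instance

-- ===== CLAIM (what is proved, stated in full; the proofs are below) =====
def Claim_equal_sort_detections_by_grid : Prop := ∀ (detections : List (List Int)) (row_threshold : Int), Dom_sort_detections_by_grid detections row_threshold → Pre_sort_detections_by_grid detections row_threshold → Spec_sort_detections_by_grid detections row_threshold (sort_detections_by_grid detections row_threshold)

-- ===== LEMMAS AND PROOFS =====

-- sort of a group by x (= det[0]), as both versions perform on each row
def pvSortX (g : List (List Int)) : List (List Int) :=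
  PySem.List.sorted g (fun d => PySem.List.pyGetD d 0 0) false

-- recursive reading of A's grouping loop: remaining annotated list, anchor, current group
def pvGo (T : Int) : List (List Int × Int) → Int → List (List Int) → List (List Int)
  | [], _, g => pvSortX g
  | p :: t, a, g =>
    if |p.2 - a| < T then pvGo T t a (g ++ [p.1]) else pvSortX g ++ pvGo T t p.2 [p.1]

theorem pvFoldA (T : Int) (t : List (List Int × Int)) :
    ∀ (gs g : List (List Int)) (a : Int),
      (t.foldl
        (fun (st : List (List Int) × List (List Int) × Int) p =>
          if |p.2 - st.2.2| < T then (st.1, st.2.1 ++ [p.1], st.2.2)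
          else (st.1 ++ pvSortX st.2.1, [p.1], p.2)) (gs, g, a)).1
       ++ pvSortX (t.foldl
        (fun (st : List (List Int) × List (List Int) × Int) p =>
          if |p.2 - st.2.2| < T then (st.1, st.2.1 ++ [p.1], st.2.2)
          else (st.1 ++ pvSortX st.2.1, [p.1], p.2)) (gs, g, a)).2.1
       = gs ++ pvGo T t a g := by
  induction t with
  | nil => intro gs g a; simp [pvGo]
  | cons p t ih =>
    intro gs g a
    simp only [List.foldl_cons, pvGo]
    by_cases h : |p.2 - a| < T
    · simpa [h] using ih gs (g ++ [p.1]) a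
    · simpa [h, List.append_assoc] using ih (gs ++ pvSortX g) [p.1] p.2

-- A's accumulator loop is B's split recursion: the pending group g together with the
-- elements still within threshold of the anchor forms exactly the row B splits off.
theorem pvGo_eq_arrange (T : Int) (t : List (List Int × Int)) :
    ∀ (a : Int) (g : List (List Int)),
      pvGo T t a g
        = pvSortX (g ++ (t.takeWhile (fun p => decide (|p.2 - a| < T))).map Prod.fst)
          ++ pvArrange T (t.dropWhile (fun p => decide (|p.2 - a| < T))) := by
  induction t with
  | nil => intro a g; simp [pvGo, pvArrange]
  | cons p t ih =>
    intro a g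
    by_cases h : |p.2 - a| < T
    · have ht : (p :: t).takeWhile (fun p => decide (|p.2 - a| < T))
          = p :: t.takeWhile (fun p => decide (|p.2 - a| < T)) := by
        simp [h]
      have hd : (p :: t).dropWhile (fun p => decide (|p.2 - a| < T))
          = t.dropWhile (fun p => decide (|p.2 - a| < T)) := by
        simp [h]
      rw [ht, hd]
      simp only [pvGo, if_pos h]
      simpa using ih a (g ++ [p.1])
    · have ht : (p :: t).takeWhile (fun p => decide (|p.2 - a| < T)) = [] := by
        simp [h]
      have hd : (p :: t).dropWhile (fun p => decide (|p.2 - a| < T)) = p :: t := by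
        simp [h]
      rw [ht, hd]
      simp only [pvGo, if_neg h, List.map_nil, List.append_nil]
      have := ih p.2 [p.1]
      simp only [List.singleton_append] at this
      rw [this, pvArrange]
      simp only [pvSortX]

-- ===== VERDICT (by name: the statement is the Claim_ definition above) =====
theorem sort_detections_by_grid_spec : Claim_equal_sort_detections_by_grid := by
  intro detections row_threshold _hdom _hpre
  unfold Spec_sort_detections_by_grid sort_detections_by_grid sort_detections_by_grid_alt
  by_cases hnil : detections = []
  · subst hnil
    simp [pvArrange, PySem.List.sorted]
  · simp only [hnil, if_false]
    set ys := PySem.List.sorted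
      (detections.map (fun d => (d, PySem.List.pyGetD d 1 0 + PySem.List.pyGetD d 3 0)))
      (fun p => p.2) false with hys
    have hysne : ys ≠ [] := by
      rw [hys, Ne, PySem.List.sorted_eq_nil_iff]
      simpa using hnil
    obtain ⟨q, rest, hq⟩ := List.exists_cons_of_ne_nil hysne
    obtain ⟨d0, c0⟩ := q
    rw [hq]
    simp only [List.foldl_cons]
    have hA := pvFoldA (2 * row_threshold) rest [] [d0] c0
    simp only [pvSortX] at hA
    rw [hA, List.nil_append]
    have hGo := pvGo_eq_arrange (2 * row_threshold) rest c0 [d0]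
    simp only [pvSortX, List.singleton_append] at hGo
    rw [hGo, pvArrange]
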